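-- pv_equiv track=rewrite | github.com/ZYiJie/sohu-2022-competition | Official-Baseline/情感分类/src/utils/load_datasets.py | merge_idx
-- ===== SOURCE A (Python) =====
-- def merge_idx(idxArr, span, content):
--     assert len(idxArr) >= 1
--     if len(idxArr)==1:
--         return content[max(0,idxArr[0]-span) : min(len(content),idxArr[0]+span)]
--     i = 0
--     ret = []
--     while True:
--         if i>=len(idxArr):break
--         temp_i = i
--         for j in range(i+1,len(idxArr)):
--             if idxArr[j]-idxArr[temp_i] > 2*span:
--                 temp_i = j-1
--                 break
--             else:
--                 temp_i = j
--         ret.append(content[max(0,idxArr[i]-span) : min(len(content),idxArr[temp_i]+span)])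
--         i = temp_i+1
--     return '#'.join(ret)
-- ===== SOURCE B (Python) =====
-- def merge_idx(idxArr, span, content):
--     assert len(idxArr) >= 1
--     n = len(idxArr)
--     breaks = [j for j in range(1, n) if idxArr[j] - idxArr[j - 1] > 2 * span]
--     return '#'.join(content[max(0, idxArr[s] - span):min(len(content), idxArr[e - 1] + span)]
--                     for s, e in zip([0] + breaks, breaks + [n]))
-- ===== Notes on version B (the rewrite author's own statement) =====
-- stated objective: simpler
-- what changed: Replaces A's while-loop with a nested break-out scan (and its special single-index branch) by two flat passes: a filter collecting the adjacent-gap break points, then a zip of segment bounds mapped to windows and joined; no special case needed.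
-- outside the precondition, e.g. on merge_idx([], 0, 'abc'): A raises AssertionError, B raises AssertionError
import Mathlib
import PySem

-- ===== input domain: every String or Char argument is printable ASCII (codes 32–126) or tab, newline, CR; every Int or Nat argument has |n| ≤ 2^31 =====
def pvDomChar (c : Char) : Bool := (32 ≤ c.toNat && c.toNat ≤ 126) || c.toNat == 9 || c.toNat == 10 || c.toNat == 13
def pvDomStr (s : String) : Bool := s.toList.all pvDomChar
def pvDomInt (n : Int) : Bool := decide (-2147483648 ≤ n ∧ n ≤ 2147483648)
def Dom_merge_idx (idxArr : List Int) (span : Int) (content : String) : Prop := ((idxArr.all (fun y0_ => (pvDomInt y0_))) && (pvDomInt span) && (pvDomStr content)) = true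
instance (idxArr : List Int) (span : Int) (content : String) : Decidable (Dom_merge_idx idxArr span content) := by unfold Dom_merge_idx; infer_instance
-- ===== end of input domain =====

-- B replaces A's while-loop with nested break-scan by a break-point list plus a zip of
-- segment bounds (objective: simpler; same O(n) cost).


-- ===== PORT A =====
-- content[max(0, x - span) : min(len(content), y + span)] — the window expression both
-- Pythons contain verbatim; PySem.List.slice is Python-exact (the stop may be negative).
def pvWindow (content : List Char) (span x y : Int) : List Char :=
  PySem.List.slice content (some (max 0 (x - span))) (some (min (content.length : Int) (y + span)))

-- A's inner 'for j in range(i+1, len(idxArr))' with its break; called with j = temp_i + 1.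
-- fuel only makes the recursion structural; fuel = len(idxArr) always suffices (j increases).
def pvScanA (a : List Int) (span : Int) (fuel temp_i j : Nat) : Nat :=
  match fuel with
  | 0 => temp_i
  | fuel + 1 =>
    if j < a.length then
      if a.getD j 0 - a.getD temp_i 0 > 2 * span then j - 1
      else pvScanA a span fuel j (j + 1)
    else temp_i

-- A's outer 'while True' loop with accumulator ret; fuel = len(idxArr) suffices (i increases each pass).
def pvLoopA (a : List Int) (span : Int) (content : List Char) (fuel i : Nat) (ret : List (List Char)) : List (List Char) :=
  match fuel with
  | 0 => ret
  | fuel + 1 =>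
    if i < a.length then
      let t := pvScanA a span a.length i (i + 1)
      pvLoopA a span content fuel (t + 1) (ret ++ [pvWindow content span (a.getD i 0) (a.getD t 0)])
    else ret

def merge_idx (idxArr : List Int) (span : Int) (content : String) : String :=
  -- assert len(idxArr) >= 1: the empty list raises AssertionError (outside Pre_); "" is a placeholder
  if idxArr.length ≥ 1 then
    if idxArr.length = 1 then
      String.ofList (pvWindow content.toList span (idxArr.getD 0 0) (idxArr.getD 0 0))
    else
      String.ofList (PySem.Chars.join ['#'] (pvLoopA idxArr span content.toList idxArr.length 0 []))
  else ""

-- ===== PORT B =====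
def merge_idx_alt (idxArr : List Int) (span : Int) (content : String) : String :=
  -- assert len(idxArr) >= 1 (AssertionError outside Pre_)
  if idxArr.length ≥ 1 then
    let n := idxArr.length
    -- range(1, n) over Nat indices (exact: 1 ≤ n here, so range(1,n) = [1, …, n-1])
    let breaks := (List.range' 1 (n - 1)).filter
      (fun j => idxArr.getD j 0 - idxArr.getD (j - 1) 0 > 2 * span)
    String.ofList (PySem.Chars.join ['#']
      (((0 :: breaks).zip (breaks ++ [n])).map
        (fun se => pvWindow content.toList span (idxArr.getD se.1 0) (idxArr.getD (se.2 - 1) 0))))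
  else ""

-- ===== PRECONDITION & SPEC =====
-- Pre_ excludes only idxArr = [], where A's assert raises AssertionError.
def Pre_merge_idx (idxArr : List Int) (span : Int) (content : String) : Prop := idxArr ≠ []
instance (idxArr : List Int) (span : Int) (content : String) : Decidable (Pre_merge_idx idxArr span content) := by unfold Pre_merge_idx; infer_instance
def pvWitness_merge_idx : List Int × Int × String := ([3, 4, 20], 2, "abcdefghijklmnopqrstuvwx")

def Spec_merge_idx (idxArr : List Int) (span : Int) (content : String) (out : String) : Prop := out = merge_idx_alt idxArr span content
instance (idxArr : List Int) (span : Int) (content : String) (out : String) : Decidable (Spec_merge_idx idxArr span content out) := by unfold Spec_merge_idx; infer_instance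

-- ===== CLAIM (what is proved, stated in full; the proofs are below) =====
def Claim_equal_merge_idx : Prop := ∀ (idxArr : List Int) (span : Int) (content : String), Dom_merge_idx idxArr span content → Pre_merge_idx idxArr span content → Spec_merge_idx idxArr span content (merge_idx idxArr span content)

-- ===== LEMMAS AND PROOFS =====

-- the break points strictly greater than i (B computes pvBks 0)
def pvBks (a : List Int) (span : Int) (i : Nat) : List Nat :=
  (List.range' (i + 1) (a.length - 1 - i)).filter
    (fun j => a.getD j 0 - a.getD (j - 1) 0 > 2 * span)

-- one-step unfolding of pvBks
theorem pvBks_step (a : List Int) (span : Int) (i : Nat) :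
    pvBks a span i =
      if i + 1 < a.length then
        (if a.getD (i + 1) 0 - a.getD i 0 > 2 * span then (i + 1) :: pvBks a span (i + 1)
         else pvBks a span (i + 1))
      else [] := by
  by_cases h : i + 1 < a.length
  · have hlen : a.length - 1 - i = (a.length - 1 - (i + 1)) + 1 := by omega
    rw [if_pos h]
    unfold pvBks
    rw [hlen, List.range'_succ, List.filter_cons]
    simp only [Nat.add_sub_cancel]
    by_cases hg : a.getD (i + 1) 0 - a.getD i 0 > 2 * span
    · rw [if_pos hg, if_pos (by simpa using hg)]
    · rw [if_neg hg, if_neg (by simpa using hg)]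
  · rw [if_neg h]
    unfold pvBks
    have : a.length - 1 - i = 0 := by omega
    rw [this]
    simp

theorem pvBks_mem (a : List Int) (span : Int) (i x : Nat) (hx : x ∈ pvBks a span i) :
    i + 1 ≤ x ∧ x < a.length := by
  have hr := List.mem_range'_1.mp (List.mem_of_mem_filter hx)
  omega

theorem pvBks_cons (a : List Int) (span : Int) :
    ∀ i b rest, pvBks a span i = b :: rest → pvBks a span b = rest := by
  have key : ∀ k i b rest, a.length - i ≤ k → pvBks a span i = b :: rest → pvBks a span b = rest := by
    intro k
    induction k with
    | zero =>
      intro i b rest hk hB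
      have := pvBks_mem a span i b (hB ▸ List.mem_cons_self ..)
      omega
    | succ k ih =>
      intro i b rest hk hB
      rw [pvBks_step] at hB
      by_cases h : i + 1 < a.length
      · rw [if_pos h] at hB
        by_cases hg : a.getD (i + 1) 0 - a.getD i 0 > 2 * span
        · rw [if_pos hg] at hB
          obtain ⟨hb, hrest⟩ := List.cons_eq_cons.mp hB
          subst hb; exact hrest
        · rw [if_neg hg] at hB
          exact ih (i + 1) b rest (by omega) hB
      · rw [if_neg h] at hB; exact absurd hB (by simp)
  intro i b rest hB
  exact key (a.length - i) i b rest le_rfl hB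

theorem pvScanA_eq (a : List Int) (span : Int) : ∀ fuel t, a.length - t ≤ fuel → t < a.length →
    pvScanA a span fuel t (t + 1) = (pvBks a span t).headD a.length - 1 := by
  intro fuel
  induction fuel with
  | zero => intro t hk ht; omega
  | succ k ih =>
    intro t hk ht
    rw [pvScanA, pvBks_step]
    by_cases h1 : t + 1 < a.length
    · rw [if_pos h1, if_pos h1]
      by_cases hg : a.getD (t + 1) 0 - a.getD t 0 > 2 * span
      · rw [if_pos hg, if_pos hg]
        simp
      · rw [if_neg hg, if_neg hg]
        exact ih (t + 1) (by omega) h1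
    · rw [if_neg h1, if_neg h1]
      simp only [List.headD_nil]
      omega

theorem pvLoopA_exhaust (a : List Int) (span : Int) (c : List Char) (fuel i : Nat)
    (ret : List (List Char)) (h : ¬ i < a.length) : pvLoopA a span c fuel i ret = ret := by
  cases fuel with
  | zero => rfl
  | succ k => rw [pvLoopA, if_neg h]

theorem pvLoopA_eq (a : List Int) (span : Int) (c : List Char) : ∀ fuel i, a.length - i ≤ fuel → i < a.length → ∀ ret,
    pvLoopA a span c fuel i ret = ret ++
      (((i :: pvBks a span i).zip (pvBks a span i ++ [a.length])).map
        (fun se => pvWindow c span (a.getD se.1 0) (a.getD (se.2 - 1) 0))) := by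
  intro fuel
  induction fuel with
  | zero => intro i hk hi; omega
  | succ k ih =>
    intro i hk hi ret
    rw [pvLoopA, if_pos hi]
    simp only [pvScanA_eq a span a.length i (by omega) hi]
    cases hB : pvBks a span i with
    | nil =>
      simp only [List.headD_nil]
      have h1 : a.length - 1 + 1 = a.length := by omega
      rw [h1, pvLoopA_exhaust a span c k a.length _ (lt_irrefl _)]
      simp
    | cons b rest =>
      have hmem := pvBks_mem a span i b (hB ▸ List.mem_cons_self ..)
      have hrest := pvBks_cons a span i b rest hB
      simp only [List.headD_cons]
      have hb1 : b - 1 + 1 = b := by omega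
      rw [hb1, ih b (by omega) (by omega) _, hrest]
      simp

-- ===== VERDICT (by name: the statement is the Claim_ definition above) =====
theorem merge_idx_spec : Claim_equal_merge_idx := by
  intro idxArr span content _ hpre
  have hlen : 1 ≤ idxArr.length := by
    cases idxArr with
    | nil => exact absurd rfl hpre
    | cons x xs => simp
  unfold Spec_merge_idx merge_idx merge_idx_alt
  rw [if_pos hlen, if_pos hlen]
  have hfold : (List.range' 1 (idxArr.length - 1)).filter
      (fun j => idxArr.getD j 0 - idxArr.getD (j - 1) 0 > 2 * span) = pvBks idxArr span 0 := by
    unfold pvBks; rfl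
  by_cases h1 : idxArr.length = 1
  · rw [if_pos h1]
    have hbks : pvBks idxArr span 0 = [] := by
      unfold pvBks
      rw [h1]
      simp
    simp only [hfold, hbks]
    simp [PySem.Chars.join_singleton, h1]
  · rw [if_neg h1]
    rw [pvLoopA_eq idxArr span content.toList idxArr.length 0 (by omega) (by omega) []]
    simp only [hfold]
    simp
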